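-- pv_equiv track=rewrite | github.com/joao-conde/foobar | solutions/queue-to-do.py | solution
-- ===== SOURCE A (Python) =====
-- def solution(start, length):
--     id = start
--     checksum = None
--     for skip in range(length):
--         for i in range(length - skip):
--             checksum = id + i if checksum is None else checksum ^ (id + i)
--         id += length
--
--     return checksum
-- ===== SOURCE B (Python) =====
-- def _xor_range(lo, hi):
--     """XOR of all integers in [lo, hi), any sign, in O(1)."""
--     if lo >= hi:
--         return 0
--     if lo % 2:
--         return lo ^ _xor_range(lo + 1, hi)
--     pairs, rem = divmod(hi - lo, 2)
--     acc = pairs % 2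
--     if rem:
--         acc ^= hi - 1
--     return acc
--
--
-- def solution(start, length):
--     checksum = 0
--     row = start
--     for skip in range(length):
--         checksum ^= _xor_range(row, row + length - skip)
--         row += length
--     return checksum
-- ===== Notes on version B (the rewrite author's own statement) =====
-- stated objective: faster
-- what changed: B replaces A's two nested loops (one XOR per element of the triangular block) by a single pass over the rows, folding each row in O(1) with a closed-form XOR-of-a-range obtained by pairing 2k with 2k+1.
-- outside the precondition, e.g. on solution(5, 0): A returns None, B returns 0
import Mathlib
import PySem

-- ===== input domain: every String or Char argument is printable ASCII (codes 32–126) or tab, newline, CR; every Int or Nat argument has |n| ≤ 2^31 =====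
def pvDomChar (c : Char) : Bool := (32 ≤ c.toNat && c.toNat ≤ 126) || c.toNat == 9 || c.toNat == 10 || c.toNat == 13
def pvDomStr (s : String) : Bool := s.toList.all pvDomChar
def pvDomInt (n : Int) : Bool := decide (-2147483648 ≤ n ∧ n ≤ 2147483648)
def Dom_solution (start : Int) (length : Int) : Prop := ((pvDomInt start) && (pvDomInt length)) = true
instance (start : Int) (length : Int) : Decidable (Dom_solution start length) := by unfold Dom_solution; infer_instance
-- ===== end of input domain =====

-- B replaces A's quadratic element-by-element XOR with one pass over the rows,
-- each row folded in O(1) by a closed-form XOR-of-range (pairing 2k with 2k+1); objective: faster.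


-- ===== PORT A =====
-- literal port of A: outer loop over skip, inner loop over i, checksum : Option Int
-- (None only when length ≤ 0, which Pre_solution excludes; .getD 0 just extracts the value)
def solution (start : Int) (length : Int) : Int :=
  let st :=
    (PySem.List.pyRange 0 length 1).foldl
      (fun (st : Int × Option Int) skip =>
        let cs := (PySem.List.pyRange 0 (length - skip) 1).foldl
          (fun c i =>
            match c with
            | none => some (st.1 + i)
            | some x => some (PySem.Int.bxor x (st.1 + i))) st.2
        (st.1 + length, cs))
      (start, none)
  st.2.getD 0

-- ===== PORT B =====
-- XOR of all integers in [lo, hi), any sign, in O(1) (port of _xor_range)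
def xorRange (lo hi : Int) : Int :=
  if _h : lo ≥ hi then 0
  else if PySem.Int.mod lo 2 ≠ 0 then
    PySem.Int.bxor lo (xorRange (lo + 1) hi)
  else
    let pairs := PySem.Int.floordiv (hi - lo) 2
    let rem := PySem.Int.mod (hi - lo) 2
    let acc := PySem.Int.mod pairs 2
    if rem ≠ 0 then PySem.Int.bxor acc (hi - 1) else acc
termination_by (hi - lo).toNat
decreasing_by simp at _h; omega

def solution_alt (start : Int) (length : Int) : Int :=
  ((PySem.List.pyRange 0 length 1).foldl
    (fun (st : Int × Int) skip =>
      (PySem.Int.bxor st.1 (xorRange st.2 (st.2 + length - skip)), st.2 + length))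
    (0, start)).1

-- ===== PRECONDITION & SPEC =====
-- Pre_ excludes length ≤ 0, where A's loop never runs and A returns None, which is not an Int.
def Pre_solution (start : Int) (length : Int) : Prop := 1 ≤ length
instance (start : Int) (length : Int) : Decidable (Pre_solution start length) := by
  unfold Pre_solution; infer_instance
def pvWitness_solution : Int × Int := (17, 4)

def Spec_solution (start : Int) (length : Int) (out : Int) : Prop := out = solution_alt start length
instance (start : Int) (length : Int) (out : Int) : Decidable (Spec_solution start length out) := by
  unfold Spec_solution; infer_instance

-- ===== CLAIM (what is proved, stated in full; the proofs are below) =====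
def Claim_equal_solution : Prop := ∀ (start : Int) (length : Int), Dom_solution start length → Pre_solution start length → Spec_solution start length (solution start length)

-- ===== LEMMAS AND PROOFS =====

-- xorAll a n = XOR of a, a+1, …, a+n-1 (proof-side reference value)
def xorAll : Int → Nat → Int
  | _, 0 => 0
  | a, n + 1 => PySem.Int.bxor a (xorAll (a + 1) n)

lemma bxor_eq_ixor (a b : Int) : PySem.Int.bxor a b = Int.xor a b := by
  rcases a with m | m <;> rcases b with n | n <;>
    simp [PySem.Int.bxor, Int.xor, Int.negSucc_eq] <;> omega

lemma bxor_assoc (a b c : Int) :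
    PySem.Int.bxor a (PySem.Int.bxor b c) = PySem.Int.bxor (PySem.Int.bxor a b) c := by
  simp only [bxor_eq_ixor]
  rcases a with m | m <;> rcases b with n | n <;> rcases c with p | p <;>
    simp [Int.xor, Nat.xor_assoc]

lemma zero_bxor (a : Int) : PySem.Int.bxor 0 a = a := by
  rw [PySem.Int.bxor_comm]; exact PySem.Int.bxor_zero a

lemma nat_even_xor_one (m : Nat) (h : m % 2 = 0) : m ^^^ 1 = m + 1 := by
  apply Nat.eq_of_testBit_eq
  intro i
  have hd : (m ^^^ 1) / 2 = m / 2 := by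
    have h1 : (m ^^^ 1) >>> 1 = m >>> 1 ^^^ 1 >>> 1 := Nat.shiftRight_xor_distrib
    simpa [Nat.shiftRight_one] using h1
  cases i with
  | zero => simp [Nat.testBit_zero]
  | succ j =>
    have h2 : (m + 1) / 2 = m / 2 := by omega
    simp [Nat.testBit_add_one, h2, hd]

lemma nat_even_xor_succ (m : Nat) (h : m % 2 = 0) : m ^^^ (m + 1) = 1 := by
  rw [← nat_even_xor_one m h, ← Nat.xor_assoc, Nat.xor_self, Nat.zero_xor]

-- an even integer XORed with its successor gives 1
lemma bxor_even_succ (a : Int) (h : a % 2 = 0) : PySem.Int.bxor a (a + 1) = 1 := by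
  rw [bxor_eq_ixor]
  rcases a with m | m
  · have hm : m % 2 = 0 := by
      simp only [Int.ofNat_eq_natCast] at h; omega
    show Int.xor (Int.ofNat m) (Int.ofNat (m + 1)) = 1
    simp [Int.xor, nat_even_xor_succ m hm]
  · have hm : ∃ k, m = k + 1 ∧ k % 2 = 0 := by
      refine ⟨m - 1, ?_, ?_⟩ <;> omega
    obtain ⟨k, rfl, hk⟩ := hm
    show Int.xor (Int.negSucc (k + 1)) (Int.negSucc k) = 1
    simp [Int.xor, Nat.xor_comm (k + 1) k, nat_even_xor_succ k hk]

-- peel the LAST element off xorAll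
lemma xorAll_succ_right (n : Nat) : ∀ a : Int,
    xorAll a (n + 1) = PySem.Int.bxor (xorAll a n) (a + n) := by
  induction n with
  | zero => intro a; simp [xorAll, zero_bxor]
  | succ k ih =>
    intro a
    show PySem.Int.bxor a (xorAll (a + 1) (k + 1)) = _
    rw [ih (a + 1), bxor_assoc]
    simp only [xorAll]
    push_cast; ring_nf

-- closed form for xorAll starting at an EVEN integer
lemma xorAll_even (n : Nat) : ∀ a : Int, a % 2 = 0 →
    xorAll a n = PySem.Int.bxor (if (n / 2) % 2 = 1 then 1 else 0)
      (if n % 2 = 1 then a + n - 1 else 0) := by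
  induction n using Nat.twoStepInduction with
  | zero => intro a _; simp [xorAll]
  | one => intro a _; simp [xorAll, zero_bxor]
  | more k ih _ =>
    intro a ha
    have step : xorAll a (k + 2) = PySem.Int.bxor 1 (xorAll (a + 2) k) := by
      simp only [xorAll]
      rw [bxor_assoc, bxor_even_succ a ha, show a + 1 + 1 = a + 2 from by ring]
    rw [step, ih (a + 2) (by omega)]
    have hdiv : (k + 2) / 2 = k / 2 + 1 := by omega
    have hmod : (k + 2) % 2 = k % 2 := by omega
    rw [hdiv, hmod, bxor_assoc]
    have htail : (if k % 2 = 1 then a + ((k + 2 : Nat) : Int) - 1 else 0)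
        = (if k % 2 = 1 then a + 2 + (k : Int) - 1 else 0) := by
      split
      · push_cast; ring
      · rfl
    rw [htail]
    congr 1
    rcases Nat.even_or_odd (k / 2) with he | ho
    · have h1 : k / 2 % 2 = 0 := by rcases he with ⟨t, ht⟩; omega
      have h2 : (k / 2 + 1) % 2 = 1 := by omega
      simp [h1, h2]
    · have h1 : k / 2 % 2 = 1 := by rcases ho with ⟨t, ht⟩; omega
      have h2 : (k / 2 + 1) % 2 = 0 := by omega
      simp [h1, h2]

-- B's O(1) helper computes exactly xorAll over the interval
lemma xorRange_eq (lo hi : Int) : xorRange lo hi = xorAll lo (hi - lo).toNat := by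
  generalize hfuel : (hi - lo).toNat = n
  induction n using Nat.strong_induction_on generalizing lo with
  | _ n ih =>
    by_cases hge : lo ≥ hi
    · have : n = 0 := by omega
      subst this
      rw [xorRange]
      simp [hge, xorAll]
    · push_neg at hge
      have hmod2 := PySem.Int.mod_eq_emod_of_pos (a := lo) (b := 2) (by omega)
      have hnot : ¬ lo ≥ hi := by omega
      by_cases hodd : PySem.Int.mod lo 2 ≠ 0
      · rw [xorRange, dif_neg hnot, if_pos hodd]
        have hn : ∃ m, n = m + 1 ∧ (hi - (lo + 1)).toNat = m := by
          refine ⟨n - 1, by omega, by omega⟩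
        obtain ⟨m, rfl, hm⟩ := hn
        rw [ih m (by omega) (lo + 1) hm]
        rfl
      · push_neg at hodd
        rw [xorRange, dif_neg hnot, if_neg (not_not_intro hodd)]
        have hdn : hi - lo = (n : Int) := by omega
        have hpairs : PySem.Int.floordiv (hi - lo) 2 = ((n / 2 : Nat) : Int) := by
          rw [hdn]; exact_mod_cast PySem.Int.floordiv_natCast n 2
        have hrem : PySem.Int.mod (hi - lo) 2 = ((n % 2 : Nat) : Int) := by
          rw [hdn]; exact_mod_cast PySem.Int.mod_natCast n 2
        have hacc : PySem.Int.mod ((n / 2 : Nat) : Int) 2 = ((n / 2 % 2 : Nat) : Int) :=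
          by exact_mod_cast PySem.Int.mod_natCast (n / 2) 2
        rw [xorAll_even n lo (by omega)]
        simp only [hpairs, hrem, hacc]
        have htl : hi - 1 = lo + (n : Int) - 1 := by omega
        rcases Nat.even_or_odd (n / 2) with he | ho <;>
          rcases Nat.even_or_odd n with he2 | ho2 <;>
          [ (have ha : n / 2 % 2 = 0 := by rcases he with ⟨t,ht⟩; omega);
            (have ha : n / 2 % 2 = 0 := by rcases he with ⟨t,ht⟩; omega);
            (have ha : n / 2 % 2 = 1 := by rcases ho with ⟨t,ht⟩; omega);
            (have ha : n / 2 % 2 = 1 := by rcases ho with ⟨t,ht⟩; omega) ] <;>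
          [ (have hb : n % 2 = 0 := by rcases he2 with ⟨t,ht⟩; omega);
            (have hb : n % 2 = 1 := by rcases ho2 with ⟨t,ht⟩; omega);
            (have hb : n % 2 = 0 := by rcases he2 with ⟨t,ht⟩; omega);
            (have hb : n % 2 = 1 := by rcases ho2 with ⟨t,ht⟩; omega) ] <;>
          simp [ha, hb, htl, PySem.Int.bxor_zero, zero_bxor]

-- A's inner loop from an already-set checksum
lemma inner_some (id : Int) : ∀ (k : Nat) (c : Int),
    (PySem.List.pyRange 0 (k : Int) 1).foldl
      (fun c i =>
        match c with
        | none => some (id + i)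
        | some x => some (PySem.Int.bxor x (id + i))) (some c)
    = some (PySem.Int.bxor c (xorAll id k)) := by
  intro k
  induction k with
  | zero => intro c; simp [PySem.List.pyRange, xorAll, PySem.Int.bxor_zero]
  | succ m ih =>
    intro c
    have hr : PySem.List.pyRange 0 ((m : Int) + 1) 1
        = PySem.List.pyRange 0 (m : Int) 1 ++ [(m : Int)] :=
      PySem.List.pyRange_one_succ_right (by omega)
    push_cast
    rw [hr, List.foldl_append, ih c]
    simp only [List.foldl]
    rw [xorAll_succ_right, bxor_assoc]

-- A's inner loop from None (first row): k ≥ 1 rows of elements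
lemma inner_none (id : Int) : ∀ (k : Nat), 1 ≤ k →
    (PySem.List.pyRange 0 (k : Int) 1).foldl
      (fun c i =>
        match c with
        | none => some (id + i)
        | some x => some (PySem.Int.bxor x (id + i))) none
    = some (xorAll id k) := by
  intro k
  induction k with
  | zero => omega
  | succ m ih =>
    intro _
    rcases Nat.eq_zero_or_pos m with rfl | hm
    · show (PySem.List.pyRange 0 1 1).foldl _ none = _
      have h1 : PySem.List.pyRange 0 1 1 = [0] := by decide
      simp [h1, xorAll, PySem.Int.bxor_zero]
    · have hr : PySem.List.pyRange 0 ((m : Int) + 1) 1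
          = PySem.List.pyRange 0 (m : Int) 1 ++ [(m : Int)] :=
        PySem.List.pyRange_one_succ_right (by omega)
      push_cast
      rw [hr, List.foldl_append, ih hm]
      simp only [List.foldl]
      rw [xorAll_succ_right]

-- inner loop from some c, for an ARBITRARY Int bound (empty when m ≤ 0)
lemma inner_some_int (id : Int) (m : Int) (c : Int) :
    (PySem.List.pyRange 0 m 1).foldl
      (fun c i =>
        match c with
        | none => some (id + i)
        | some x => some (PySem.Int.bxor x (id + i))) (some c)
    = some (PySem.Int.bxor c (xorAll id m.toNat)) := by
  rcases le_or_gt m 0 with hle | hgt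
  · have h0 : PySem.List.pyRange 0 m 1 = [] := by
      simp [PySem.List.pyRange]; omega
    have h1 : m.toNat = 0 := by omega
    simp [h0, h1, xorAll, PySem.Int.bxor_zero]
  · have hm : m = (m.toNat : Int) := by omega
    rw [hm]
    exact inner_some id m.toNat c

-- combined outer-loop invariant: after k ≥ 1 rows, A's state is
-- (start + k·L, some acc) where acc is exactly B's accumulator, and B's row is start + k·L
lemma outer_inv (start L : Int) (hL : 1 ≤ L) : ∀ (k : Nat), 1 ≤ k →
    (PySem.List.pyRange 0 (k : Int) 1).foldl
      (fun (st : Int × Option Int) _skip =>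
        let cs := (PySem.List.pyRange 0 (L - _skip) 1).foldl
          (fun c i =>
            match c with
            | none => some (st.1 + i)
            | some x => some (PySem.Int.bxor x (st.1 + i))) st.2
        (st.1 + L, cs))
      (start, none)
    = (start + k * L,
       some (((PySem.List.pyRange 0 (k : Int) 1).foldl
        (fun (st : Int × Int) skip =>
          (PySem.Int.bxor st.1 (xorRange st.2 (st.2 + L - skip)), st.2 + L))
        (0, start)).1))
    ∧ ((PySem.List.pyRange 0 (k : Int) 1).foldl
        (fun (st : Int × Int) skip =>
          (PySem.Int.bxor st.1 (xorRange st.2 (st.2 + L - skip)), st.2 + L))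
        (0, start)).2 = start + k * L := by
  intro k
  induction k with
  | zero => omega
  | succ m ih =>
    intro _
    have hcast : (((m + 1 : Nat) : Int)) = (m : Int) + 1 := by push_cast; ring
    rcases Nat.eq_zero_or_pos m with rfl | hm
    · have h1 : PySem.List.pyRange 0 1 1 = [0] := by decide
      rw [hcast]
      simp only [Nat.cast_zero, zero_add]
      rw [h1]
      simp only [List.foldl_cons, List.foldl_nil]
      have hinner : (PySem.List.pyRange 0 (L - 0) 1).foldl
          (fun c i =>
            match c with
            | none => some (start + i)
            | some x => some (PySem.Int.bxor x (start + i))) none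
          = some (xorAll start L.toNat) := by
        rw [show L - 0 = ((L.toNat : Nat) : Int) by omega]
        exact inner_none start L.toNat (by omega)
      have hxr : xorRange start (start + L - 0) = xorAll start L.toNat := by
        rw [xorRange_eq, show (start + L - 0 - start).toNat = L.toNat by omega]
      rw [hinner, hxr, zero_bxor]
      constructor
      · simp only [Prod.mk.injEq]
        exact ⟨by show start + L = start + 1 * L; ring, trivial⟩
      · show start + L = start + 1 * L
        ring
    · obtain ⟨ihA, ihB⟩ := ih hm
      have hr : PySem.List.pyRange 0 ((m : Int) + 1) 1
          = PySem.List.pyRange 0 (m : Int) 1 ++ [(m : Int)] :=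
        PySem.List.pyRange_one_succ_right (by omega)
      rw [hcast]
      simp only [hr, List.foldl_append, List.foldl_cons, List.foldl_nil]
      rw [ihA, ihB]
      rw [inner_some_int (start + (m : Int) * L) (L - (m : Int)) _]
      have hxr : xorRange (start + (m : Int) * L) (start + (m : Int) * L + L - (m : Int))
          = xorAll (start + (m : Int) * L) (L - (m : Int)).toNat := by
        rw [xorRange_eq]
        congr 1
        omega
      rw [hxr]
      constructor
      · simp only [Prod.mk.injEq]
        exact ⟨by show start + (m : Int) * L + L = start + ((m : Int) + 1) * L; ring, trivial⟩
      · show start + (m : Int) * L + L = start + ((m : Int) + 1) * L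
        ring

-- ===== VERDICT (by name: the statement is the Claim_ definition above) =====
theorem solution_spec : Claim_equal_solution := by
  intro start length _hdom hpre
  unfold Spec_solution
  simp only [solution, solution_alt]
  have hL : 1 ≤ length := hpre
  have hk : length = ((length.toNat : Nat) : Int) := by omega
  have hk1 : 1 ≤ length.toNat := by omega
  obtain ⟨hA, _hB⟩ := outer_inv start length hL length.toNat hk1
  have hrange : PySem.List.pyRange 0 length 1
      = PySem.List.pyRange 0 ((length.toNat : Nat) : Int) 1 := by rw [← hk]
  rw [hrange, hA]
  rfl
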